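-- pv_equiv track=rewrite | github.com/humlab/penelope | penelope/corpus/windowed_corpus.py | concept_windows
-- ===== SOURCE A (Python) =====
-- import collections
-- import itertools
-- from typing import Iterable, Set
--
-- def concept_windows(tokens: Iterable[str], concept: Set[str], n_tokens: int, padding='*'):
--     """Yields a sequence of windows centered on any of the concept's token stored in `concept`.
--     `n_window` is the the number of tokens to either side of the docus word, i.e.
--     the total size of the window is (n_window + 1 + n_window).
--
--     Uses the "deck" `collection.deque` with a fixed length (appends exceeding `maxlen` deletes oldest entry)
--     The yelded windows are all equal-sized with the focus `*`-padded at the beginning and end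
--     of the token sequence.
--
--     Parameters
--     ----------
--     tokens : Iterable[str]
--         The sequence of tokens to be windowed
--     concept : Sequence[str]
--         A set of concept words.
--     n_tokens : int
--         The number of tokens to either side of the concept token in focus.
--
--     Returns
--     -------
--     Sequence[str]
--         The window
--
--     Yields
--     -------
--     [type]
--         [description]
--     """
--
--     n_window = 2 * n_tokens + 1
--
--     _tokens = itertools.chain([padding] * n_tokens, tokens, [padding] * n_tokens)
--     # _tokens = iter(_tokens)
--
--     # Fill a full window minus 1
--     window = collections.deque((next(_tokens, None) for _ in range(0, n_window - 1)), maxlen=n_window)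
--     for token in _tokens:
--         window.append(token)
--         if window[n_tokens] in concept:
--             yield list(window)
-- ===== SOURCE B (Python) =====
-- def concept_windows(tokens, concept, n_tokens, padding='*'):
--     """Yield fixed-size windows centered on concept tokens, via random-access
--     slicing of a once-materialized padded list (no deque, no eviction)."""
--     tokens = list(tokens)
--     pad = [padding] * n_tokens
--     padded = pad + tokens + pad
--     width = 2 * n_tokens + 1
--     for i, token in enumerate(tokens):
--         if token in concept:
--             yield padded[i : i + width]
-- ===== Notes on version B (the rewrite author's own statement) =====
-- stated objective: simpler
-- what changed: Replaces the sliding deque with maxlen-eviction (prefill 2n items, append-and-evict per step, test the deque's middle slot) by materializing the padded list once and slicing padded[i:i+2n+1] at each original index whose token is a concept word.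
import Mathlib
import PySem

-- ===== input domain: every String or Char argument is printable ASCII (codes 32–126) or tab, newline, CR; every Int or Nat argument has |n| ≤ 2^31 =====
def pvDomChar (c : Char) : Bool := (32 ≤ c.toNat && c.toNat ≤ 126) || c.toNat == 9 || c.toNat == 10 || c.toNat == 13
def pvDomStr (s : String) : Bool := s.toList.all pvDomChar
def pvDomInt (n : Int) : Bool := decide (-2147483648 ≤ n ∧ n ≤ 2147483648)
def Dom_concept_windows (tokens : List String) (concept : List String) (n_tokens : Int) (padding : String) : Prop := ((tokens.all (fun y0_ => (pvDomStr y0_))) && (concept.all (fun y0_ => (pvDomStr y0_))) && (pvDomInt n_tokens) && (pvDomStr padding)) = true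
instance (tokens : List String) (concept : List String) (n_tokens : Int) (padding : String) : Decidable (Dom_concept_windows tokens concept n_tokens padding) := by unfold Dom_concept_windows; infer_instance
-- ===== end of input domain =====

-- B replaces A's sliding deque (prefill, append-and-evict, middle-slot test) by one
-- padded list sliced at each concept position; objective: simpler. Return value only
-- (both Pythons are generators; compared as the list of yielded windows).


-- ===== PORT A =====
-- the for-loop over the remaining chain: `window.append(token)` on a deque with
-- maxlen w evicts from the front, i.e. `(window ++ [t]).drop (len+1 - w)`;
-- `window[n_tokens]` is PySem.List.pyGet? (the none branch = IndexError is
-- unreachable: under Pre_ the window is full, 0 ≤ n_tokens < w)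
def cwDeque (concept : List String) (w : Nat) (nt : Int) : List String → List String → List (List String)
  | _, [] => []
  | window, t :: rest =>
    let window' := (window ++ [t]).drop (window.length + 1 - w)
    match PySem.List.pyGet? window' nt with
    | some c => if concept.contains c then window' :: cwDeque concept w nt window' rest
                else cwDeque concept w nt window' rest
    | none => cwDeque concept w nt window' rest

def concept_windows (tokens : List String) (concept : List String) (n_tokens : Int) (padding : String) : List (List String) :=
  let n := n_tokens.toNat            -- [padding] * n_tokens: Python list-mult clamps negatives to []
  let w := 2 * n + 1                 -- n_window (Pre_ requires 0 ≤ n_tokens, where this equals Python's 2*n_tokens+1)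
  let chain := List.replicate n padding ++ tokens ++ List.replicate n padding  -- itertools.chain
  -- prefill of n_window - 1 items via next(_tokens, None): chain always has ≥ w-1
  -- elements here, so None never appears and the fill is chain.take (w-1)
  cwDeque concept w n_tokens (chain.take (w - 1)) (chain.drop (w - 1))

-- ===== PORT B =====
-- the `for i, token in enumerate(tokens)` loop of Source B
def cwSliceLoop (concept : List String) (padded : List String) (width : Int) : List (Int × String) → List (List String)
  | [] => []
  | (i, tok) :: rest =>
    if concept.contains tok then
      PySem.List.slice padded (some i) (some (i + width)) :: cwSliceLoop concept padded width rest
    else cwSliceLoop concept padded width rest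

def concept_windows_alt (tokens : List String) (concept : List String) (n_tokens : Int) (padding : String) : List (List String) :=
  let pad := List.replicate n_tokens.toNat padding   -- [padding] * n_tokens (negative count → [])
  let padded := pad ++ tokens ++ pad
  let width := 2 * n_tokens + 1
  cwSliceLoop concept padded width (PySem.List.enumerate tokens 0)

-- ===== PRECONDITION & SPEC =====
-- A raises ValueError (deque maxlen must be non-negative) for n_tokens < 0; nothing else raises.
def Pre_concept_windows (tokens : List String) (concept : List String) (n_tokens : Int) (padding : String) : Prop := 0 ≤ n_tokens
instance (tokens : List String) (concept : List String) (n_tokens : Int) (padding : String) : Decidable (Pre_concept_windows tokens concept n_tokens padding) := by unfold Pre_concept_windows; infer_instance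

def pvWitness_concept_windows : List String × List String × Int × String := (["a", "b", "c"], ["b"], 1, "*")

def Spec_concept_windows (tokens : List String) (concept : List String) (n_tokens : Int) (padding : String) (out : List (List String)) : Prop := out = concept_windows_alt tokens concept n_tokens padding
instance (tokens : List String) (concept : List String) (n_tokens : Int) (padding : String) (out : List (List String)) : Decidable (Spec_concept_windows tokens concept n_tokens padding out) := by unfold Spec_concept_windows; infer_instance

-- ===== CLAIM (what is proved, stated in full; the proofs are below) =====
def Claim_equal_concept_windows : Prop := ∀ (tokens : List String) (concept : List String) (n_tokens : Int) (padding : String), Dom_concept_windows tokens concept n_tokens padding → Pre_concept_windows tokens concept n_tokens padding → Spec_concept_windows tokens concept n_tokens padding (concept_windows tokens concept n_tokens padding)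

-- ===== LEMMAS AND PROOFS =====

-- Invariant: after the deque has consumed chain positions [0, p), it holds exactly
-- (chain.take p).drop (p - w) and the chain suffix still to process is chain.drop p;
-- from there on A yields exactly B's slices at indices p - 2n, p - 2n + 1, ...
lemma cwDeque_eq_slices_gen (concept tokens : List String) (padding : String) (n : Nat)
    (c : List String) (hc : c = List.replicate n padding ++ tokens ++ List.replicate n padding) :
    ∀ (ts : List String) (p : Nat), 2 * n ≤ p → c.drop p = ts →
      cwDeque concept (2 * n + 1) ((n : Nat) : Int) ((c.take p).drop (p - (2 * n + 1))) ts
      = cwSliceLoop concept c (((2 * n + 1 : Nat) : Int))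
          (PySem.List.enumerate (tokens.drop (p - 2 * n)) (((p - 2 * n : Nat) : Int))) := by
  have hL : c.length = n + tokens.length + n := by simp [hc]; ring
  intro ts
  induction ts with
  | nil =>
    intro p hp hdrop
    have hlen : c.length ≤ p := by
      by_contra h
      have := List.drop_eq_nil_iff.mp hdrop
      omega
    rw [List.drop_eq_nil_iff.mpr (show tokens.length ≤ p - 2 * n by omega)]
    simp [cwDeque, cwSliceLoop, PySem.List.enumerate]
  | cons t ts' ih =>
    intro p hp hdrop
    have hplen : p < c.length := by
      by_contra h
      rw [List.drop_eq_nil_iff.mpr (by omega)] at hdrop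
      simp at hdrop
    rw [List.drop_eq_getElem_cons hplen] at hdrop
    obtain ⟨ht, hrest⟩ := List.cons.inj hdrop
    set i := p - 2 * n with hi
    have hiL : i < tokens.length := by omega
    -- the evicted deque after this append is the slice ending at position p+1
    have hwin : (((c.take p).drop (p - (2 * n + 1))) ++ [t]).drop
        (((c.take p).drop (p - (2 * n + 1))).length + 1 - (2 * n + 1))
        = (c.drop i).take (2 * n + 1) := by
      have hwl : ((c.take p).drop (p - (2 * n + 1))).length = min p (2 * n + 1) := by
        simp; omega
      rw [hwl, ← ht, ← List.drop_append_of_le_length (by simp; omega),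
          ← List.take_succ_eq_append_getElem hplen, List.drop_drop,
          show p - (2 * n + 1) + (min p (2 * n + 1) + 1 - (2 * n + 1)) = i by omega,
          List.drop_take, show p + 1 - i = 2 * n + 1 by omega]
    -- the middle slot of that window is tokens[i]
    have hcell : getElem? c (i + n) = some (tokens[i]'hiL) := by
      rw [hc, List.getElem?_append_left (by simp only [List.length_append, List.length_replicate]; omega),
          List.getElem?_append_right (by simp only [List.length_replicate]; omega),
          show i + n - (List.replicate n padding).length = i by simp,
          List.getElem?_eq_getElem hiL]
    have hmid : ((c.drop i).take (2 * n + 1))[(n : Nat)]? = some (tokens[i]'hiL) := by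
      rw [List.getElem?_take_of_lt (by omega), List.getElem?_drop, hcell]
    -- unfold both loops one step
    rw [List.drop_eq_getElem_cons hiL, PySem.List.enumerate_cons]
    simp only [cwDeque, cwSliceLoop, hwin, PySem.List.pyGet?_natCast, hmid]
    have hslice : PySem.List.slice c (some ((i : Nat) : Int)) (some (((i : Nat) : Int) + ((2 * n + 1 : Nat) : Int)))
        = (c.drop i).take (2 * n + 1) := PySem.List.slice_natCast_add c i (2 * n + 1)
    have hrec : cwDeque concept (2 * n + 1) ((n : Nat) : Int) ((c.drop i).take (2 * n + 1)) ts'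
        = cwSliceLoop concept c (((2 * n + 1 : Nat) : Int))
            (PySem.List.enumerate (tokens.drop (i + 1)) (((i : Nat) : Int) + 1)) := by
      have h1 := ih (p + 1) (by omega) hrest
      rw [show p + 1 - 2 * n = i + 1 by omega] at h1
      rw [show p + 1 - (2 * n + 1) = i by omega, List.drop_take,
          show p + 1 - i = 2 * n + 1 by omega] at h1
      rw [h1]
      norm_num
    rw [hslice, hrec]

theorem concept_windows_spec : Claim_equal_concept_windows := by
  intro tokens concept n_tokens padding _ hpre
  unfold Spec_concept_windows
  have hn : n_tokens = ((n_tokens.toNat : Nat) : Int) := (Int.toNat_of_nonneg hpre).symm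
  set n := n_tokens.toNat with hn'
  simp only [concept_windows, concept_windows_alt]
  rw [hn]
  simp only [Int.toNat_natCast]
  have h := cwDeque_eq_slices_gen concept tokens padding n
      (List.replicate n padding ++ tokens ++ List.replicate n padding) rfl
      ((List.replicate n padding ++ tokens ++ List.replicate n padding).drop (2 * n))
      (2 * n) le_rfl rfl
  rw [show 2 * n - (2 * n + 1) = 0 by omega, List.drop_zero, Nat.sub_self,
      List.drop_zero, Nat.cast_zero] at h
  rw [show 2 * n + 1 - 1 = 2 * n by omega,
      show (2 : Int) * ((n : Nat) : Int) + 1 = ((2 * n + 1 : Nat) : Int) by push_cast; ring]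
  exact h
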